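-- pv_equiv track=rewrite | github.com/Wi-FiTestSuite/AFC-DUT | AFC-TestScript/AFCBaseScript.py | get_bw_from_cfi
-- ===== SOURCE A (Python) =====
-- def get_bw_from_cfi(cfi):
--     cfi_list = [7, 23, 39, 55, 71, 87, 135, 151, 167]
--     cfi_160m_list = [15, 47, 79, 111, 143, 175, 207]
--     if cfi in cfi_160m_list:
--         return 160
--     for index in cfi_list:
--         if cfi == index:
--             return 80
--         elif cfi == index - 4 or cfi == index + 4:
--             return 40
--         elif cfi == 123 or cfi == 179:
--             return 40
--
--     return 20
-- ===== SOURCE B (Python) =====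
-- def _build_bw_table():
--     table = {}
--     for c in (15, 47, 79, 111, 143, 175, 207):
--         table[c] = 160
--     for c in (7, 23, 39, 55, 71, 87, 135, 151, 167):
--         table[c] = 80
--         table[c - 4] = 40
--         table[c + 4] = 40
--     table[123] = 40
--     table[179] = 40
--     return table
--
-- _BW_TABLE = _build_bw_table()
--
-- def get_bw_from_cfi(cfi):
--     return _BW_TABLE.get(cfi, 20)
-- ===== Notes on version B (the rewrite author's own statement) =====
-- stated objective: simpler
-- what changed: Replaced the membership test plus a scanning loop with per-element branch conditions by a bandwidth table built once (the three key groups are disjoint) and a single dict lookup with a default for unknown channels.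
import Mathlib
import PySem

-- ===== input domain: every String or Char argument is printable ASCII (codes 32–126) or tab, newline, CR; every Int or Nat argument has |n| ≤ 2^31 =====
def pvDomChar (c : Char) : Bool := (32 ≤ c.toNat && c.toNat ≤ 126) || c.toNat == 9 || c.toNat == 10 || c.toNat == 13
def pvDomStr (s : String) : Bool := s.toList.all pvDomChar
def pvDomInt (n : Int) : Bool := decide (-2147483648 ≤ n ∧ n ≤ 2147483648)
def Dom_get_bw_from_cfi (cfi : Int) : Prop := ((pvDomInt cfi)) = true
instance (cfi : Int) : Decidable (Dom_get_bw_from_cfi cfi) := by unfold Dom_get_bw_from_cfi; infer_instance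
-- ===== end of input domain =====

-- B replaces A's membership test + scanning loop by a bandwidth table built once
-- plus a single dict lookup with default 20 (objective: simpler).


-- ===== PORT A =====
-- the for-loop with early returns, as a structural recursion over cfi_list
def pvLoopA (cfi : Int) : List Int → Int
  | [] => 20
  | index :: rest =>
    if cfi = index then 80
    else if cfi = index - 4 ∨ cfi = index + 4 then 40
    else if cfi = 123 ∨ cfi = 179 then 40
    else pvLoopA cfi rest

def get_bw_from_cfi (cfi : Int) : Int :=
  let cfi_list : List Int := [7, 23, 39, 55, 71, 87, 135, 151, 167]
  let cfi_160m_list : List Int := [15, 47, 79, 111, 143, 175, 207]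
  if cfi ∈ cfi_160m_list then 160
  else pvLoopA cfi cfi_list

-- ===== PORT B =====
-- the table built once by _build_bw_table in Source B
def pvBWTable : PySem.Dict Int Int :=
  let t := ([15, 47, 79, 111, 143, 175, 207] : List Int).foldl
    (fun t c => t.insert c 160) PySem.Dict.empty
  let t := ([7, 23, 39, 55, 71, 87, 135, 151, 167] : List Int).foldl
    (fun t c => ((t.insert c 80).insert (c - 4) 40).insert (c + 4) 40) t
  (t.insert 123 40).insert 179 40

def get_bw_from_cfi_alt (cfi : Int) : Int :=
  pvBWTable.getD cfi 20

-- ===== PRECONDITION & SPEC =====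
def Spec_get_bw_from_cfi (cfi : Int) (out : Int) : Prop := out = get_bw_from_cfi_alt cfi
instance (cfi : Int) (out : Int) : Decidable (Spec_get_bw_from_cfi cfi out) := by unfold Spec_get_bw_from_cfi; infer_instance

-- ===== CLAIM (what is proved, stated in full; the proofs are below) =====
def Claim_equal_get_bw_from_cfi : Prop := ∀ (cfi : Int), Dom_get_bw_from_cfi cfi → Spec_get_bw_from_cfi cfi (get_bw_from_cfi cfi)

-- ===== LEMMAS AND PROOFS =====
theorem pvBWTable_items : pvBWTable = PySem.Dict.mk
    [(15, 160), (47, 160), (79, 160), (111, 160), (143, 160), (175, 160), (207, 160),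
     (7, 80), (3, 40), (11, 40), (23, 80), (19, 40), (27, 40), (39, 80), (35, 40), (43, 40),
     (55, 80), (51, 40), (59, 40), (71, 80), (67, 40), (75, 40), (87, 80), (83, 40), (91, 40),
     (135, 80), (131, 40), (139, 40), (151, 80), (147, 40), (155, 40), (167, 80), (163, 40), (171, 40),
     (123, 40), (179, 40)] := by decide

-- A's loop returns 20 when no condition ever fires
theorem pvLoopA_20 (cfi : Int) (l : List Int)
    (h0 : ¬(cfi = 123 ∨ cfi = 179))
    (h : ∀ i ∈ l, cfi ≠ i ∧ cfi ≠ i - 4 ∧ cfi ≠ i + 4) :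
    pvLoopA cfi l = 20 := by
  induction l with
  | nil => rfl
  | cons a t ih =>
    obtain ⟨h1, h2, h3⟩ := h a (List.mem_cons_self ..)
    rw [pvLoopA, if_neg h1, if_neg (by tauto), if_neg h0]
    exact ih (fun i hi => h i (List.mem_cons_of_mem _ hi))

-- outside [3, 211] every comparison in both programs is false, so both return 20
theorem pv_eq_out (cfi : Int) (h : cfi < 3 ∨ 211 < cfi) :
    get_bw_from_cfi cfi = 20 ∧ get_bw_from_cfi_alt cfi = 20 := by
  constructor
  · rw [get_bw_from_cfi, if_neg (by simp; omega)]
    exact pvLoopA_20 cfi _ (by omega) (by intro i hi; simp at hi; omega)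
  · rw [get_bw_from_cfi_alt]
    apply PySem.Dict.getD_of_not_contains
    rw [pvBWTable_items]
    simp [PySem.Dict.contains_mk]
    omega

theorem pv_eq (cfi : Int) : get_bw_from_cfi cfi = get_bw_from_cfi_alt cfi := by
  by_cases h : 3 ≤ cfi ∧ cfi ≤ 211
  · obtain ⟨h1, h2⟩ := h
    interval_cases cfi <;> decide
  · obtain ⟨ha, hb⟩ := pv_eq_out cfi (by omega)
    rw [ha, hb]

-- ===== VERDICT (by name: the statement is the Claim_ definition above) =====
theorem get_bw_from_cfi_spec : Claim_equal_get_bw_from_cfi := by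
  intro cfi _
  exact pv_eq cfi
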